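-- pv_equiv track=rewrite | github.com/pforu/SUAPC | SUAPC competition/SUAPC 2025 summer/I.py | findHHH
-- ===== SOURCE A (Python) =====
-- def findHHH(s):
--     a=[-1, -1]
--     count = 0
--     for i in s:
--         if i=="H":
--             if a[1] == 1:
--                 return count
--             elif a[0] == 1 and a[1] == 0:
--                 a[1] = 1
--             else:
--                 a[0] = 1
--                 a[1] = 0
--         else:
--             a[0]=0
--             a[1]=0
--
--         count = count+1
--     return -1
-- ===== SOURCE B (Python) =====
-- def findHHH(s):
--     i = s.find("HHH")
--     return i + 2 if i != -1 else -1
-- ===== Notes on version B (the rewrite author's own statement) =====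
-- stated objective: simpler
-- what changed: Replaces the per-character two-flag state machine with a single library substring search for the triple-H pattern, returning its index plus 2 (the position of the third H) or -1.
import Mathlib
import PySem

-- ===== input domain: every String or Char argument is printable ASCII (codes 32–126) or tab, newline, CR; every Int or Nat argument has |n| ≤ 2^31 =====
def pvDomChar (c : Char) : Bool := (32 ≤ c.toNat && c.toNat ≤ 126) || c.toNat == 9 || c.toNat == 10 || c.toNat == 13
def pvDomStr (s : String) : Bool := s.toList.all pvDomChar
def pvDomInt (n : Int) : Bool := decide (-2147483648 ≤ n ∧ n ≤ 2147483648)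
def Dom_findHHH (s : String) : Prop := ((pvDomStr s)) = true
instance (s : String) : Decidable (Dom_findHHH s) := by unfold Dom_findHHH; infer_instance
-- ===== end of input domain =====

-- B replaces A's per-character two-flag state machine by one library substring search for "HHH" (+2 offset); objective: simpler.

-- ===== PORT A =====
-- the 'for i in s' loop: state is (a0, a1, count); 'return count' inside the loop is the base of the recursion
def findHHH_loop (l : List Char) (a0 a1 count : Int) : Int :=
  match l with
  | [] => -1
  | c :: cs =>
    if c = 'H' then
      if a1 = 1 then count
      else if a0 = 1 ∧ a1 = 0 then findHHH_loop cs a0 1 (count + 1)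
      else findHHH_loop cs 1 0 (count + 1)
    else findHHH_loop cs 0 0 (count + 1)

def findHHH (s : String) : Int := findHHH_loop s.toList (-1) (-1) 0

-- ===== PORT B =====
def findHHH_alt (s : String) : Int :=
  let i := PySem.Str.find s "HHH"
  if i ≠ -1 then i + 2 else -1

-- ===== PRECONDITION & SPEC =====
def Spec_findHHH (s : String) (out : Int) : Prop := out = findHHH_alt s
instance (s : String) (out : Int) : Decidable (Spec_findHHH s out) := by unfold Spec_findHHH; infer_instance

-- ===== CLAIM (what is proved, stated in full; the proofs are below) =====
def Claim_equal_findHHH : Prop := ∀ (s : String), Dom_findHHH s → Spec_findHHH s (findHHH s)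

-- ===== LEMMAS AND PROOFS =====

-- uniqueness: find returns j if sub occurs (as a prefix of drop j) at j and nowhere earlier
theorem pv_find_eq_of (l sub : List Char) (j : ℕ)
    (hp : sub <+: l.drop j) (hmin : ∀ i < j, ¬ sub <+: l.drop i) :
    PySem.Chars.find l sub = (j : Int) := by
  have hinf : sub <:+: l :=
    List.infix_iff_prefix_suffix.mpr ⟨l.drop j, hp, List.drop_suffix j l⟩
  have hnn : 0 ≤ PySem.Chars.find l sub := (PySem.Chars.find_nonneg_iff l sub).mpr hinf
  obtain ⟨hpf, hmf⟩ := PySem.Chars.find_spec hnn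
  have : (PySem.Chars.find l sub).toNat = j := by
    rcases lt_trichotomy (PySem.Chars.find l sub).toNat j with h | h | h
    · exact absurd hpf (hmin _ h)
    · exact h
    · exact absurd hp (hmf j h)
  omega

theorem pv_find_of_prefix (l sub : List Char) (hp : sub <+: l) :
    PySem.Chars.find l sub = 0 := by
  have := pv_find_eq_of l sub 0 (by simpa using hp) (by omega)
  simpa using this

-- stepping find past a head that starts no occurrence
theorem pv_find_cons (c : Char) (cs sub : List Char) (h : ¬ sub <+: c :: cs) :
    PySem.Chars.find (c :: cs) sub =
      if PySem.Chars.find cs sub = -1 then -1 else 1 + PySem.Chars.find cs sub := by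
  by_cases hg : PySem.Chars.find cs sub = -1
  · have hni : ¬ sub <:+: cs := (PySem.Chars.find_eq_neg_one_iff cs sub).mp hg
    have : ¬ sub <:+: c :: cs := by
      intro hi
      rcases List.infix_cons_iff.mp hi with h' | h'
      · exact h h'
      · exact hni h'
    simp [hg, (PySem.Chars.find_eq_neg_one_iff _ sub).mpr this]
  · have hnn : 0 ≤ PySem.Chars.find cs sub := by
      have := PySem.Chars.neg_one_le_find cs sub; omega
    obtain ⟨hpf, hmf⟩ := PySem.Chars.find_spec hnn
    set g := (PySem.Chars.find cs sub).toNat with hgdef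
    have hcalc : PySem.Chars.find (c :: cs) sub = ((g + 1 : ℕ) : Int) := by
      apply pv_find_eq_of
      · simpa [List.drop_succ_cons] using hpf
      · intro i hi
        match i with
        | 0 => simpa using h
        | (j + 1) =>
          have : j < g := by omega
          simpa [List.drop_succ_cons] using hmf j this
    rw [hcalc]
    rw [if_neg hg]
    omega

-- the value of A's loop from a state with trailing-H streak k (k = 0,1,2), expressed through find
def pvG (k : ℕ) (l : List Char) (n : Int) : Int :=
  if PySem.Chars.find (List.replicate k 'H' ++ l) ['H', 'H', 'H'] = -1 then -1
  else n - k + PySem.Chars.find (List.replicate k 'H' ++ l) ['H', 'H', 'H'] + 2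

theorem pv_main (l : List Char) : ∀ n : Int,
    findHHH_loop l 0 0 n = pvG 0 l n ∧
    findHHH_loop l 1 0 n = pvG 1 l n ∧
    findHHH_loop l 1 1 n = pvG 2 l n := by
  induction l with
  | nil =>
    intro n
    have e0 : PySem.Chars.find ([] : List Char) ['H', 'H', 'H'] = -1 := by decide
    have e1 : PySem.Chars.find ['H'] ['H', 'H', 'H'] = -1 := by decide
    have e2 : PySem.Chars.find ['H', 'H'] ['H', 'H', 'H'] = -1 := by decide
    refine ⟨?_, ?_, ?_⟩ <;>
      simp [findHHH_loop, pvG, List.replicate, e0, e1, e2]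
  | cons c cs ih =>
    intro n
    by_cases hc : c = 'H'
    · subst hc
      refine ⟨?_, ?_, ?_⟩
      · -- streak 0 + 'H' → streak 1
        have hl : findHHH_loop ('H' :: cs) 0 0 n = findHHH_loop cs 1 0 (n + 1) := by
          norm_num [findHHH_loop]
        rw [hl, (ih (n + 1)).2.1]
        simp only [pvG, List.replicate, List.nil_append, List.cons_append]
        split <;> omega
      · -- streak 1 + 'H' → streak 2
        have hl : findHHH_loop ('H' :: cs) 1 0 n = findHHH_loop cs 1 1 (n + 1) := by
          norm_num [findHHH_loop]
        rw [hl, (ih (n + 1)).2.2]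
        simp only [pvG, List.replicate, List.nil_append, List.cons_append]
        split <;> omega
      · -- streak 2 + 'H' → return count
        have hl : findHHH_loop ('H' :: cs) 1 1 n = n := by
          norm_num [findHHH_loop]
        have hpre : ['H', 'H', 'H'] <+: List.replicate 2 'H' ++ 'H' :: cs := by
          simp [List.replicate, List.cons_prefix_cons]
        rw [hl, pvG, pv_find_of_prefix _ _ hpre]
        norm_num
    · -- a non-'H' character resets the streak
      have h0 := (ih (n + 1)).1
      have hshift : ∀ m : ℕ, m ≤ 2 →
          PySem.Chars.find (List.replicate m 'H' ++ c :: cs) ['H', 'H', 'H'] =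
            if PySem.Chars.find cs ['H', 'H', 'H'] = -1 then -1
            else (m + 1 : Int) + PySem.Chars.find cs ['H', 'H', 'H'] := by
        intro m hm
        induction m with
        | zero =>
          have hnp : ¬ ['H', 'H', 'H'] <+: c :: cs := by
            intro h'
            rw [List.cons_prefix_cons] at h'
            exact hc h'.1.symm
          simpa using pv_find_cons c cs _ hnp
        | succ m ihm =>
          have hm' : m ≤ 2 := by omega
          have hnp : ¬ ['H', 'H', 'H'] <+: 'H' :: (List.replicate m 'H' ++ c :: cs) := by
            intro h'
            rw [List.cons_prefix_cons] at h'
            have h2 := h'.2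
            match m, hm with
            | 0, _ =>
              simp only [List.replicate_zero, List.nil_append, List.cons_prefix_cons] at h2
              exact hc h2.1.symm
            | 1, _ =>
              simp only [List.replicate_succ, List.replicate_zero, List.cons_append,
                List.nil_append, List.cons_prefix_cons] at h2
              exact hc h2.2.1.symm
          have hstepfind := pv_find_cons 'H' (List.replicate m 'H' ++ c :: cs) ['H', 'H', 'H'] hnp
          rw [List.replicate_succ, List.cons_append, hstepfind, ihm hm']
          by_cases hf : PySem.Chars.find cs ['H', 'H', 'H'] = -1
          · simp [hf]
          · have hb := PySem.Chars.neg_one_le_find cs ['H', 'H', 'H']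
            rw [if_neg hf, if_neg (by omega), if_neg hf]
            push_cast
            ring
      have hstep : ∀ k : ℕ, k ≤ 2 → pvG k (c :: cs) n = pvG 0 cs (n + 1) := by
        intro k hk
        have hb := PySem.Chars.neg_one_le_find cs ['H', 'H', 'H']
        simp only [pvG, hshift k hk, List.replicate_zero, List.nil_append]
        by_cases hf : PySem.Chars.find cs ['H', 'H', 'H'] = -1
        · simp [hf]
        · rw [if_neg (by rw [if_neg hf]; omega), if_neg hf, if_neg hf]
          omega
      have hl : ∀ a0 a1 : Int, findHHH_loop (c :: cs) a0 a1 n = findHHH_loop cs 0 0 (n + 1) := by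
        intro a0 a1
        simp [findHHH_loop, hc]
      refine ⟨?_, ?_, ?_⟩
      · rw [hl, h0, ← hstep 0 (by omega)]
      · rw [hl, h0, ← hstep 1 (by omega)]
      · rw [hl, h0, ← hstep 2 (by omega)]

-- A's initial state (-1, -1) behaves exactly like the reset state (0, 0)
theorem pv_init (l : List Char) (n : Int) :
    findHHH_loop l (-1) (-1) n = findHHH_loop l 0 0 n := by
  cases l with
  | nil => rfl
  | cons c cs => by_cases hc : c = 'H' <;> norm_num [findHHH_loop, hc]

-- ===== VERDICT (by name: the statement is the Claim_ definition above) =====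
theorem findHHH_spec : Claim_equal_findHHH := by
  intro s _
  unfold Spec_findHHH findHHH findHHH_alt
  rw [pv_init, (pv_main s.toList 0).1]
  have hHHH : "HHH".toList = ['H', 'H', 'H'] := rfl
  simp only [pvG, PySem.Str.find_eq, hHHH, List.replicate_zero, List.nil_append]
  have hb := PySem.Chars.neg_one_le_find s.toList ['H', 'H', 'H']
  by_cases h : PySem.Chars.find s.toList ['H', 'H', 'H'] = -1
  · simp [h]
  · rw [if_neg h, if_pos h]
    omega
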